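-- pv_equiv track=rewrite | github.com/talavis/advent-of-code | 2024/22.py | calc
-- ===== SOURCE A (Python) =====
-- def calc(data):
--     def mp(x, y):
--         return (x ^ y) % 16777216
--
--     ans = 0
--     for d in data:
--         a = d
--         for i in range(2000):
--             x = a * 64
--             a = mp(a, x)
--             y = a // 32
--             a = mp(a, y)
--             z = a * 2048
--             a = mp(a, z)
--         ans += a
--     return ans
-- ===== SOURCE B (Python) =====
-- def calc(data):
--     M = 16777216
--
--     def step(a):
--         a = (a ^ (a * 64)) % M
--         a = (a ^ (a // 32)) % M
--         return (a ^ (a * 2048)) % M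
--
--     # one step is GF(2)-linear on 24-bit values; precompute the 2000-step
--     # image of each basis vector once, then each seed costs 24 xors
--     cols = []
--     for i in range(24):
--         v = 1 << i
--         for _ in range(2000):
--             v = step(v)
--         cols.append(v)
--
--     ans = 0
--     for d in data:
--         m = d % M
--         acc = 0
--         for i in range(24):
--             if (m >> i) & 1:
--                 acc ^= cols[i]
--         ans += acc
--     return ans
-- ===== Notes on version B (the rewrite author's own statement) =====
-- stated objective: faster
-- what changed: Instead of iterating the xor/shift pseudo-random step 2000 times per seed, B uses that each step is GF(2)-linear on 24-bit values: it precomputes the 2000-step image of each of the 24 basis vectors once, then each seed costs one 24-bit reduction plus at most 24 xors.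
import Mathlib
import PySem

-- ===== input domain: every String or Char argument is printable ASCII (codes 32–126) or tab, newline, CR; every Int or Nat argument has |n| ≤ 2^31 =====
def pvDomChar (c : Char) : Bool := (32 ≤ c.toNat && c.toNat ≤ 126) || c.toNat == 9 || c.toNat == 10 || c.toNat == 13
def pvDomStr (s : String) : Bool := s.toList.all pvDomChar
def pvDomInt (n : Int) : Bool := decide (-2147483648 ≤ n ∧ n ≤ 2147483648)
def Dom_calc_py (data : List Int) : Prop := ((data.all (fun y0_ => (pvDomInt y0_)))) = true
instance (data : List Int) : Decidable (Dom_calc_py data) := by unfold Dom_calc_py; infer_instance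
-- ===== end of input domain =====

-- B replaces the per-seed 2000-iteration loop by 24 precomputed basis images of the
-- 2000-step GF(2)-linear map, combined per seed by xor over set bits (objective: faster).

-- ===== PORT A =====
-- nested helper mp of A
def pvMp (x y : Int) : Int := PySem.Int.mod (PySem.Int.bxor x y) 16777216

def calc_py (data : List Int) : Int :=
  data.foldl (fun ans d =>
    ans + (PySem.List.pyRange 0 2000 1).foldl (fun a _i =>
      let x := a * 64
      let a := pvMp a x
      let y := PySem.Int.floordiv a 32
      let a := pvMp a y
      let z := a * 2048
      pvMp a z) d) 0

-- ===== PORT B =====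
-- helper step of Source B
def pvStepB (a : Int) : Int :=
  let a1 := PySem.Int.mod (PySem.Int.bxor a (a * 64)) 16777216
  let a2 := PySem.Int.mod (PySem.Int.bxor a1 (PySem.Int.floordiv a1 32)) 16777216
  PySem.Int.mod (PySem.Int.bxor a2 (a2 * 2048)) 16777216

-- cols: the 2000-step image of each basis vector 1 << i, i = 0..23 (Source B builds it per call;
-- it does not depend on the input, so it is a constant here).  Python's 1 << i equals 1 <<< i.toNat
-- for the nonnegative i produced by range(24).
def pvCols : List Int :=
  (PySem.List.pyRange 0 24 1).foldl (fun cols i =>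
    cols ++ [(PySem.List.pyRange 0 2000 1).foldl (fun v _ => pvStepB v)
              ((1 : Int) <<< i.toNat)]) []

def calc_py_alt (data : List Int) : Int :=
  data.foldl (fun ans d =>
    let m := PySem.Int.mod d 16777216
    ans + (PySem.List.pyRange 0 24 1).foldl (fun acc i =>
      -- Python 'if (m >> i) & 1:' — truthiness is ≠ 0; m >> i is m >>> i.toNat for i ≥ 0
      if PySem.Int.band (m >>> i.toNat) 1 ≠ 0 then
        PySem.Int.bxor acc (PySem.List.pyGetD pvCols i 0)
      else acc) 0) 0

-- ===== PRECONDITION & SPEC =====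
def Spec_calc_py (data : List Int) (out : Int) : Prop := out = calc_py_alt data
instance (data : List Int) (out : Int) : Decidable (Spec_calc_py data out) := by unfold Spec_calc_py; infer_instance

-- ===== CLAIM (what is proved, stated in full; the proofs are below) =====
def Claim_equal_calc_py : Prop := ∀ (data : List Int), Dom_calc_py data → Spec_calc_py data (calc_py data)

-- ===== LEMMAS AND PROOFS =====

-- the common one-step computation on Int (A's loop body and Source B's step are both this term)
def pvStepI (a : Int) : Int :=
  let a1 := PySem.Int.mod (PySem.Int.bxor a (a * 64)) 16777216
  let a2 := PySem.Int.mod (PySem.Int.bxor a1 (PySem.Int.floordiv a1 32)) 16777216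
  PySem.Int.mod (PySem.Int.bxor a2 (a2 * 2048)) 16777216

-- the step on Nat, split in its three xor-with-shift substeps
def pvS1 (z : Nat) : Nat := (z % 2^24) ^^^ (z * 64 % 2^24)
def pvS2 (z : Nat) : Nat := (z % 2^24) ^^^ (z / 32 % 2^24)
def pvS3 (z : Nat) : Nat := (z % 2^24) ^^^ (z * 2048 % 2^24)
def pvStepN (r : Nat) : Nat := pvS3 (pvS2 (pvS1 r))
def pvG (r : Nat) : Nat := pvStepN^[2000] r

lemma pv_xor_mul_pow (x y k : Nat) : (x ^^^ y) * 2^k = (x * 2^k) ^^^ (y * 2^k) := by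
  apply Nat.eq_of_testBit_eq; intro i
  simp only [← Nat.shiftLeft_eq, Nat.testBit_shiftLeft, Nat.testBit_xor]
  cases Decidable.em (k ≤ i) with
  | inl h => simp [h]
  | inr h => simp [h]

lemma pv_compl (n y : Nat) (h : y < 2^n) : (2^n - 1) ^^^ y = 2^n - 1 - y := by
  have he : 2^n - 1 - y = 2^n - (y+1) := by omega
  rw [he]
  apply Nat.eq_of_testBit_eq; intro i
  rw [Nat.testBit_two_pow_sub_succ h]
  simp only [Nat.testBit_xor, Nat.testBit_two_pow_sub_one]
  rcases Decidable.em (i < n) with hi | hi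
  · simp [hi]
  · have : y.testBit i = false :=
      Nat.testBit_lt_two_pow (lt_of_lt_of_le h (Nat.pow_le_pow_right (by norm_num) (by omega)))
    simp [hi, this]

lemma pv_negemod (x : Nat) :
    (-(x:Int) - 1) % (16777216:Int) = (((2^24 - 1 - x % 2^24 : Nat)) : Int) := by
  have hdZ : (16777216:Int) * ((x / 2^24 : Nat) : Int) + ((x % 2^24 : Nat):Int) = (x:Int) := by
    exact_mod_cast Nat.div_add_mod x (2^24)
  have hx : (-(x:Int) - 1)
      = (((2^24 - 1 - x % 2^24 : Nat)) : Int) + (16777216:Int) * (-((x / 2^24 : Nat) : Int) - 1) := by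
    omega
  rw [hx, Int.add_mul_emod_self_left, Int.emod_eq_of_lt (by omega) (by omega)]

lemma pv_xor_shuffle1 (c x y : Nat) : (c ^^^ x) ^^^ (c ^^^ y) = x ^^^ y := by
  simp [Nat.xor_comm, Nat.xor_left_comm]

lemma pv_xor_shuffle2 (c x y : Nat) : c ^^^ (x ^^^ y) = x ^^^ (c ^^^ y) := by
  simp [Nat.xor_comm, Nat.xor_left_comm]

lemma pv_toNat_cast_mod0 (x : Nat) : (((x:Int)) % (16777216:Int)).toNat = x % 2^24 := by
  omega

lemma pv_toNat_negemod (x : Nat) : ((-(x:Int) - 1) % (16777216:Int)).toNat = 2^24 - 1 - x % 2^24 := by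
  rw [pv_negemod]; exact Int.toNat_natCast _

lemma pv_bx (a b : Int) :
    PySem.Int.mod (PySem.Int.bxor a b) 16777216
      = (((a % (16777216:Int)).toNat ^^^ (b % (16777216:Int)).toNat : Nat) : Int) := by
  have hcastmod : ∀ x : Nat, ((x:Int)) % (16777216:Int) = ((x % 2^24 : Nat) : Int) := by
    intro x; omega
  have hmod2 : ∀ x : Nat, x % 2^24 < 2^24 := fun x => Nat.mod_lt _ (by norm_num)
  rw [PySem.Int.mod_eq_emod_of_pos (by norm_num)]
  rcases Decidable.em (0 ≤ a) with ha | ha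
  · obtain ⟨aN, rfl⟩ : ∃ n : Nat, a = (n : Int) := ⟨a.toNat, by omega⟩
    rcases Decidable.em (0 ≤ b) with hb | hb
    · obtain ⟨bN, rfl⟩ : ∃ n : Nat, b = (n : Int) := ⟨b.toNat, by omega⟩
      rw [show PySem.Int.bxor ((aN:Nat):Int) ((bN:Nat):Int) = (((aN ^^^ bN : Nat)):Int) from
            PySem.Int.bxor_natCast aN bN]
      rw [hcastmod, pv_toNat_cast_mod0, pv_toNat_cast_mod0]
      congr 1
      exact Nat.xor_mod_two_pow
    · obtain ⟨bN, rfl⟩ : ∃ n : Nat, b = -(n : Int) - 1 := ⟨(-b-1).toNat, by omega⟩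
      rw [show PySem.Int.bxor ((aN:Nat):Int) (-((bN:Nat):Int) - 1)
            = -(((aN ^^^ bN : Nat)):Int) - 1 from by
          unfold PySem.Int.bxor
          rw [if_pos (by positivity), if_neg (by omega)]
          simp only [show (-(-(bN:Int) - 1) - 1) = ((bN : Nat) : Int) from by ring,
            Int.toNat_natCast]]
      rw [pv_negemod, pv_toNat_cast_mod0, pv_toNat_negemod]
      congr 1
      rw [← pv_compl _ _ (hmod2 _), ← pv_compl _ _ (hmod2 _), Nat.xor_mod_two_pow]
      exact pv_xor_shuffle2 _ _ _
  · obtain ⟨aN, rfl⟩ : ∃ n : Nat, a = -(n : Int) - 1 := ⟨(-a-1).toNat, by omega⟩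
    rcases Decidable.em (0 ≤ b) with hb | hb
    · obtain ⟨bN, rfl⟩ : ∃ n : Nat, b = (n : Int) := ⟨b.toNat, by omega⟩
      rw [show PySem.Int.bxor (-((aN:Nat):Int) - 1) ((bN:Nat):Int)
            = -(((aN ^^^ bN : Nat)):Int) - 1 from by
          unfold PySem.Int.bxor
          rw [if_neg (by omega), if_pos (by positivity)]
          simp only [show (-(-(aN:Int) - 1) - 1) = ((aN : Nat) : Int) from by ring,
            Int.toNat_natCast]]
      rw [pv_negemod, pv_toNat_cast_mod0, pv_toNat_negemod]
      congr 1
      rw [← pv_compl _ _ (hmod2 _), ← pv_compl _ _ (hmod2 _), Nat.xor_mod_two_pow]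
      rw [Nat.xor_assoc]
    · obtain ⟨bN, rfl⟩ : ∃ n : Nat, b = -(n : Int) - 1 := ⟨(-b-1).toNat, by omega⟩
      rw [show PySem.Int.bxor (-((aN:Nat):Int) - 1) (-((bN:Nat):Int) - 1)
            = (((aN ^^^ bN : Nat)):Int) from by
          unfold PySem.Int.bxor
          rw [if_neg (by omega), if_neg (by omega)]
          simp only [show (-(-(aN:Int) - 1) - 1) = ((aN : Nat) : Int) from by ring,
            show (-(-(bN:Int) - 1) - 1) = ((bN : Nat) : Int) from by ring,
            Int.toNat_natCast]]
      rw [hcastmod, pv_toNat_negemod, pv_toNat_negemod]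
      congr 1
      rw [← pv_compl _ _ (hmod2 _), ← pv_compl _ _ (hmod2 _), Nat.xor_mod_two_pow]
      exact (pv_xor_shuffle1 _ _ _).symm

lemma pv_si (a : Int) :
    pvStepI a = ((pvStepN ((a % (16777216:Int)).toNat) : Nat) : Int) := by
  have hr : 0 ≤ a % (16777216:Int) := Int.emod_nonneg a (by norm_num)
  have hrlt : a % (16777216:Int) < 16777216 := Int.emod_lt_of_pos a (by norm_num)
  set r : Nat := (a % (16777216:Int)).toNat with hrdef
  have hrlt' : r < 2^24 := by omega
  have hmul : ((a * 64) % (16777216:Int)).toNat = r * 64 % 2^24 := by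
    rw [Int.mul_emod, show a % (16777216:Int) = ((r : Nat) : Int) from by omega,
        show ((64:Int)) % (16777216:Int) = (((64:Nat)) : Int) from by decide,
        ← Int.natCast_mul, pv_toNat_cast_mod0]
  have h1 : (a % (16777216:Int)).toNat ^^^ ((a * 64) % (16777216:Int)).toNat = pvS1 r := by
    rw [hmul, ← hrdef]
    unfold pvS1
    rw [Nat.mod_eq_of_lt hrlt']
  show PySem.Int.mod (PySem.Int.bxor
      (PySem.Int.mod (PySem.Int.bxor (PySem.Int.mod (PySem.Int.bxor a (a * 64)) 16777216)
        (PySem.Int.floordiv (PySem.Int.mod (PySem.Int.bxor a (a * 64)) 16777216) 32)) 16777216)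
      ((PySem.Int.mod (PySem.Int.bxor (PySem.Int.mod (PySem.Int.bxor a (a * 64)) 16777216)
        (PySem.Int.floordiv (PySem.Int.mod (PySem.Int.bxor a (a * 64)) 16777216) 32)) 16777216) * 2048)) 16777216
    = ((pvStepN r : Nat) : Int)
  rw [pv_bx a (a * 64), h1]
  rw [show PySem.Int.floordiv (((pvS1 r : Nat)) : Int) 32 = (((pvS1 r / 32 : Nat)) : Int) from by
        exact_mod_cast PySem.Int.floordiv_natCast (pvS1 r) 32]
  rw [pv_bx (((pvS1 r : Nat)) : Int) (((pvS1 r / 32 : Nat)) : Int),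
      pv_toNat_cast_mod0, pv_toNat_cast_mod0]
  rw [show pvS1 r % 2^24 ^^^ pvS1 r / 32 % 2^24 = pvS2 (pvS1 r) from rfl]
  rw [show (((pvS2 (pvS1 r) : Nat)) : Int) * 2048 = (((pvS2 (pvS1 r) * 2048 : Nat)) : Int) from by
        push_cast; ring]
  rw [pv_bx (((pvS2 (pvS1 r) : Nat)) : Int) (((pvS2 (pvS1 r) * 2048 : Nat)) : Int),
      pv_toNat_cast_mod0, pv_toNat_cast_mod0]
  rfl

lemma pv_stepN_mod (r : Nat) : pvStepN (r % 2^24) = pvStepN r := by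
  unfold pvStepN
  congr 1
  congr 1
  unfold pvS1
  rw [Nat.mod_mod_of_dvd _ (dvd_refl _), Nat.mod_mul_mod]

lemma pv_lan (l : List Int) : ∀ r : Nat,
    l.foldl (fun a _ => pvStepI a) ((r : Nat) : Int) = ((pvStepN^[l.length] r : Nat) : Int) := by
  induction l with
  | nil => intro r; rfl
  | cons x xs ih =>
    intro r
    have hstep : pvStepI ((r : Nat) : Int) = ((pvStepN r : Nat) : Int) := by
      rw [pv_si, pv_toNat_cast_mod0, pv_stepN_mod]
    simp only [List.foldl_cons, List.length_cons, hstep]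
    rw [ih (pvStepN r), Function.iterate_succ_apply]

lemma pv_loopA (d : Int) :
    (PySem.List.pyRange 0 2000 1).foldl (fun a _ => pvStepI a) d
      = ((pvG ((d % (16777216:Int)).toNat) : Nat) : Int) := by
  rw [PySem.List.pyRange_one_cons (by norm_num)]
  simp only [List.foldl_cons]
  rw [pv_si d, pv_lan, PySem.List.length_pyRange_one]
  rw [show ((2000:Int) - (0+1)).toNat = 1999 from by decide]
  rw [← Function.iterate_succ_apply]
  rfl

-- GF(2)-linearity of the step and of its 2000th iterate
lemma pv_s1_xor (x y : Nat) : pvS1 (x ^^^ y) = pvS1 x ^^^ pvS1 y := by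
  unfold pvS1
  rw [show (64:Nat) = 2^6 from by norm_num, pv_xor_mul_pow, Nat.xor_mod_two_pow, Nat.xor_mod_two_pow]
  simp [Nat.xor_comm, Nat.xor_left_comm, Nat.xor_assoc]

lemma pv_s2_xor (x y : Nat) : pvS2 (x ^^^ y) = pvS2 x ^^^ pvS2 y := by
  unfold pvS2
  rw [show (32:Nat) = 2^5 from by norm_num, Nat.xor_div_two_pow, Nat.xor_mod_two_pow, Nat.xor_mod_two_pow]
  simp [Nat.xor_comm, Nat.xor_left_comm, Nat.xor_assoc]

lemma pv_s3_xor (x y : Nat) : pvS3 (x ^^^ y) = pvS3 x ^^^ pvS3 y := by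
  unfold pvS3
  rw [show (2048:Nat) = 2^11 from by norm_num, pv_xor_mul_pow, Nat.xor_mod_two_pow, Nat.xor_mod_two_pow]
  simp [Nat.xor_comm, Nat.xor_left_comm, Nat.xor_assoc]

lemma pv_stepN_xor (x y : Nat) : pvStepN (x ^^^ y) = pvStepN x ^^^ pvStepN y := by
  unfold pvStepN
  rw [pv_s1_xor, pv_s2_xor, pv_s3_xor]

lemma pv_stepN_zero : pvStepN 0 = 0 := by decide

lemma pv_iter_zero (n : Nat) : pvStepN^[n] 0 = 0 := by
  induction n with
  | zero => rfl
  | succ n ih => rw [Function.iterate_succ_apply, pv_stepN_zero, ih]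

lemma pv_iter_xor (n x y : Nat) : pvStepN^[n] (x ^^^ y) = pvStepN^[n] x ^^^ pvStepN^[n] y := by
  induction n generalizing x y with
  | zero => rfl
  | succ n ih =>
    rw [Function.iterate_succ_apply, Function.iterate_succ_apply, Function.iterate_succ_apply,
        pv_stepN_xor, ih]

lemma pv_g_xor (x y : Nat) : pvG (x ^^^ y) = pvG x ^^^ pvG y := pv_iter_xor 2000 x y
lemma pv_g_zero : pvG 0 = 0 := pv_iter_zero 2000

lemma pv_clear_bit (r k : Nat) (h1 : r < 2^(k+1)) (h2 : r.testBit k = true) :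
    (r % 2^k) ^^^ 2^k = r := by
  apply Nat.eq_of_testBit_eq; intro i
  simp only [Nat.testBit_xor, Nat.testBit_mod_two_pow, Nat.testBit_two_pow]
  rcases Nat.lt_trichotomy i k with hik | hik | hik
  · simp [hik, Nat.ne_of_gt hik]
  · subst hik; simp [h2]
  · have hhi : r.testBit i = false :=
      Nat.testBit_lt_two_pow (lt_of_lt_of_le h1 (Nat.pow_le_pow_right (by norm_num) (by omega)))
    simp [Nat.lt_asymm hik, Nat.ne_of_lt hik, hhi]

lemma pv_low_of_not_bit (r k : Nat) (h1 : r < 2^(k+1)) (h2 : r.testBit k = false) : r < 2^k := by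
  rw [Nat.testBit_eq_decide_div_mod_eq] at h2
  have h2' : r / 2^k % 2 ≠ 1 := by simpa using h2
  have hq : r / 2^k < 2 := Nat.div_lt_of_lt_mul (by rw [← pow_succ]; exact h1)
  have hq0 : r / 2^k = 0 := by
    rcases Nat.le_one_iff_eq_zero_or_eq_one.mp (Nat.lt_succ_iff.mp hq) with h | h
    · exact h
    · rw [h] at h2'; exact absurd rfl h2'
  rcases (Nat.div_eq_zero_iff).mp hq0 with h | h
  · exact absurd h (by positivity)
  · exact h

lemma pv_decomp (k : Nat) : ∀ r : Nat, r < 2^k →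
    pvG r = (List.range k).foldl (fun acc i => if r.testBit i then acc ^^^ pvG (2^i) else acc) 0 := by
  induction k with
  | zero =>
    intro r hr
    have h0 : r = 0 := by omega
    subst h0
    simp [pv_g_zero]
  | succ k ih =>
    intro r hr
    rw [List.range_succ, List.foldl_append]
    simp only [List.foldl_cons, List.foldl_nil]
    have hcongr : (List.range k).foldl (fun acc i => if r.testBit i then acc ^^^ pvG (2^i) else acc) 0
        = (List.range k).foldl (fun acc i => if (r % 2^k).testBit i then acc ^^^ pvG (2^i) else acc) 0 := by
      apply PySem.List.foldl_congr_mem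
      intro acc x hx
      rw [List.mem_range] at hx
      rw [Nat.testBit_mod_two_pow]
      simp [hx]
    cases hb : r.testBit k with
    | false =>
      have hlow : r < 2^k := pv_low_of_not_bit r k hr hb
      rw [hcongr, Nat.mod_eq_of_lt hlow, ← ih r hlow]
      simp
    | true =>
      have hsplit : (r % 2^k) ^^^ 2^k = r := pv_clear_bit r k hr hb
      have hmlt : r % 2^k < 2^k := Nat.mod_lt _ (by positivity)
      rw [hcongr, ← ih _ hmlt]
      conv_lhs => rw [← hsplit]
      rw [pv_g_xor]
      simp

-- cols as a map of the Nat-side basis images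
lemma pv_cols_eq : pvCols = (List.range 24).map (fun k => ((pvG (2^k) : Nat) : Int)) := by
  unfold pvCols
  rw [show pvStepB = pvStepI from rfl]
  rw [PySem.List.foldl_append_singleton_eq_map]
  rw [show (fun (i : Int) => (PySem.List.pyRange 0 2000 1).foldl (fun v _ => pvStepI v)
        ((1 : Int) <<< ((i.toNat : Nat) : Int)))
      = (fun (i : Int) =>
          ((pvG ((((1 : Int) <<< ((i.toNat : Nat) : Int)) % (16777216:Int)).toNat) : Nat) : Int)) from
    funext (fun i => pv_loopA ((1 : Int) <<< ((i.toNat : Nat) : Int)))]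
  rw [PySem.List.pyRange_one 0 24]
  rw [show ((24:Int) - 0).toNat = 24 from by decide]
  rw [List.map_map]
  simp only [List.nil_append]
  apply List.map_congr_left
  intro k hk
  simp only [Function.comp_apply]
  rw [List.mem_range] at hk
  have harg : ((((1:Int) <<< ((((0:Int) + ((k:Nat):Int)).toNat : Nat) : Int)) % (16777216:Int)).toNat)
      = 2^k := by
    rw [show ((0:Int) + ((k : Nat) : Int)).toNat = k from by omega]
    rw [show ((1:Int) <<< ((k : Nat) : Int)) = (((2^k : Nat)) : Int) from Int.one_shiftLeft k]
    rw [Int.emod_eq_of_lt (by positivity)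
          (by have := Nat.pow_lt_pow_right (a := 2) (by norm_num) hk; omega)]
    exact Int.toNat_natCast _
  exact congrArg (fun n : Nat => ((pvG n : Nat) : Int)) harg

lemma pv_foldl_cast (l : List Nat) (F : Int → Int → Int) (G : Nat → Nat → Nat)
    (h : ∀ a k, k ∈ l → F ((a : Nat) : Int) ((k : Nat) : Int) = ((G a k : Nat) : Int)) :
    ∀ a : Nat, (l.map (fun k => ((k : Nat) : Int))).foldl F ((a : Nat) : Int)
      = ((l.foldl G a : Nat) : Int) := by
  induction l with
  | nil => intro a; rfl
  | cons x xs ih =>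
    intro a
    simp only [List.map_cons, List.foldl_cons]
    rw [h a x (by simp), ih (fun a k hk => h a k (by simp [hk])) (G a x)]

lemma pv_foldl_cast0 (l : List Nat) (F : Int → Int → Int) (G : Nat → Nat → Nat)
    (h : ∀ a k, k ∈ l → F ((a : Nat) : Int) ((k : Nat) : Int) = ((G a k : Nat) : Int)) :
    (l.map (fun (k : Nat) => ((k : Nat) : Int))).foldl F 0 = ((l.foldl G 0 : Nat) : Int) := by
  rw [show ((0:Int)) = (((0:Nat)) : Int) from rfl]
  exact pv_foldl_cast l F G h 0

lemma pv_elemB (d : Int) :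
    (PySem.List.pyRange 0 24 1).foldl (fun acc i =>
      if PySem.Int.band ((PySem.Int.mod d 16777216) >>> ((i.toNat : Nat) : Int)) 1 ≠ 0 then
        PySem.Int.bxor acc (PySem.List.pyGetD pvCols i 0)
      else acc) 0
      = ((pvG ((d % (16777216:Int)).toNat) : Nat) : Int) := by
  have hr : 0 ≤ d % (16777216:Int) := Int.emod_nonneg d (by norm_num)
  have hrlt : d % (16777216:Int) < 16777216 := Int.emod_lt_of_pos d (by norm_num)
  set r0 : Nat := (d % (16777216:Int)).toNat with hr0
  have hm : PySem.Int.mod d 16777216 = ((r0 : Nat) : Int) := by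
    rw [PySem.Int.mod_eq_emod_of_pos (by norm_num)]; omega
  have hr0lt : r0 < 2^24 := by omega
  rw [PySem.List.pyRange_one 0 24]
  rw [show ((24:Int) - 0).toNat = 24 from by decide]
  rw [show (List.range 24).map (fun (k : Nat) => (0:Int) + ((k : Nat) : Int))
        = (List.range 24).map (fun (k : Nat) => ((k : Nat) : Int)) from by
      apply List.map_congr_left; intro k _; rw [zero_add]]
  rw [pv_foldl_cast0 _ _ (fun acc i => if r0.testBit i then acc ^^^ pvG (2^i) else acc)]
  · rw [pv_decomp 24 r0 hr0lt]
  · intro a k hk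
    rw [List.mem_range] at hk
    rw [hm]
    rw [show ((((k : Nat) : Int)).toNat : Nat) = k from Int.toNat_natCast k]
    rw [show (((r0 : Nat) : Int) >>> ((k : Nat) : Int)) = (((r0 >>> k : Nat)) : Int) from by
        rw [Int.shiftRight_natCast, Int.natCast_shiftRight]]
    rw [PySem.Int.band_of_nonneg (by positivity) (by norm_num)]
    rw [show ((1:Int)).toNat = 1 from rfl, Int.toNat_natCast]
    rw [Nat.and_one_is_mod, Nat.shiftRight_eq_div_pow]
    rw [PySem.List.pyGetD_natCast, pv_cols_eq]
    rw [show ((List.range 24).map (fun k => ((pvG (2^k) : Nat) : Int))).getD k 0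
          = ((pvG (2^k) : Nat) : Int) from by
        rw [List.getD_eq_getElem?_getD, List.getElem?_map, List.getElem?_range hk]; rfl]
    rw [Nat.testBit_eq_decide_div_mod_eq]
    have h2 : r0 / 2^k % 2 = 0 ∨ r0 / 2^k % 2 = 1 := by omega
    rcases h2 with h2 | h2
    · rw [h2, if_neg (by norm_num), if_neg (by norm_num)]
    · rw [h2, if_pos (by norm_num), if_pos (by norm_num), PySem.Int.bxor_natCast]

lemma pv_elemA (d : Int) :
    (PySem.List.pyRange 0 2000 1).foldl (fun a _i =>
      let x := a * 64
      let a := pvMp a x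
      let y := PySem.Int.floordiv a 32
      let a := pvMp a y
      let z := a * 2048
      pvMp a z) d
      = ((pvG ((d % (16777216:Int)).toNat) : Nat) : Int) := by
  show (PySem.List.pyRange 0 2000 1).foldl (fun a _ => pvStepI a) d = _
  exact pv_loopA d

-- ===== VERDICT (by name: the statement is the Claim_ definition above) =====
theorem calc_py_spec : Claim_equal_calc_py := by
  intro data _
  unfold Spec_calc_py calc_py calc_py_alt
  apply PySem.List.foldl_congr_mem
  intro acc d _
  show acc + _ = acc + _
  rw [pv_elemA d]
  rw [show ((pvG ((d % (16777216:Int)).toNat) : Nat) : Int)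
        = (PySem.List.pyRange 0 24 1).foldl (fun acc i =>
            if PySem.Int.band ((PySem.Int.mod d 16777216) >>> ((i.toNat : Nat) : Int)) 1 ≠ 0 then
              PySem.Int.bxor acc (PySem.List.pyGetD pvCols i 0)
            else acc) 0 from (pv_elemB d).symm]
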